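-- pv_equiv track=rewrite | github.com/tao2years/InLineRCRepo | zeta_full/data_processor.py | _construct_input_with_markers
-- ===== SOURCE A (Python) =====
-- def _construct_input_with_markers(code: str, cursor_line: int, cursor_col: int,
--                                 start_line: int, end_line: int) -> str:
--     """构造带标记的输入代码"""
--     lines = code.split('\n')
--     result_lines = []
--
--     for i, line in enumerate(lines, 1):
--         if i == start_line:
--             result_lines.append('<|editable_region_start|>')
--
--         if i == cursor_line:
--             # 在光标位置插入标记
--             line_with_cursor = line[:cursor_col] + '<|user_cursor_is_here|>' + line[cursor_col:]
--             result_lines.append(line_with_cursor)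
--         else:
--             result_lines.append(line)
--
--         if i == end_line:
--             result_lines.append('<|editable_region_end|>')
--
--     return '\n'.join(result_lines)
-- ===== SOURCE B (Python) =====
-- def _construct_input_with_markers(code: str, cursor_line: int, cursor_col: int,
--                                 start_line: int, end_line: int) -> str:
--     """构造带标记的输入代码 — indexed edits instead of a scan-and-branch pass"""
--     lines = code.split('\n')
--     n = len(lines)
--     if 1 <= cursor_line <= n:
--         line = lines[cursor_line - 1]
--         lines[cursor_line - 1] = line[:cursor_col] + '<|user_cursor_is_here|>' + line[cursor_col:]
--     if 1 <= end_line <= n: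
--         lines.insert(end_line, '<|editable_region_end|>')
--     if 1 <= start_line <= n:
--         pos = start_line - 1
--         if 1 <= end_line <= n and end_line <= pos:
--             pos += 1  # the end marker was inserted at or before this spot
--         lines.insert(pos, '<|editable_region_start|>')
--     return '\n'.join(lines)
-- ===== Notes on version B (the rewrite author's own statement) =====
-- stated objective: alternative
-- what changed: A builds the output line-by-line in one enumerate scan with per-line branch checks; B edits the split line list in place: it rewrites the cursor line by index and then applies the two marker insertions positionally (larger position first, so earlier inserts do not shift later ones).
import Mathlib
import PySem

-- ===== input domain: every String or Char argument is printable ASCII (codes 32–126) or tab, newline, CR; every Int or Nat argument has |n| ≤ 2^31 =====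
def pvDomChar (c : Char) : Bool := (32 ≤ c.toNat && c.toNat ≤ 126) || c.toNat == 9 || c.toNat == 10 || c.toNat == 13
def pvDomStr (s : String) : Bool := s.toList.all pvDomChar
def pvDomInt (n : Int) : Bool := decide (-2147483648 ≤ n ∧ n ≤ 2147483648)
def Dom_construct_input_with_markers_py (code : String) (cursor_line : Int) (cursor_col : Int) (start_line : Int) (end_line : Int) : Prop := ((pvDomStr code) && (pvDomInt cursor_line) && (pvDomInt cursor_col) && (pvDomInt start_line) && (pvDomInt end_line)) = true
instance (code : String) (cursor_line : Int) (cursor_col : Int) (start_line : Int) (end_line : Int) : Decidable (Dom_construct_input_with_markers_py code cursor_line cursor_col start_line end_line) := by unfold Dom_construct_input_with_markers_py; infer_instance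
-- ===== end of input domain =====

-- B replaces A's single enumerate-scan-and-branch pass by indexed edits: rewrite the cursor
-- line in place, then apply the two marker insertions positionally (larger position first).
-- Objective: alternative decomposition (same cost); A raises nowhere, so no Pre_.

-- the three marker tokens (shared literals)
def pvStartMarker : List Char := "<|editable_region_start|>".toList
def pvEndMarker : List Char := "<|editable_region_end|>".toList
def pvCursorMarker : List Char := "<|user_cursor_is_here|>".toList

-- ===== PORT A =====
-- literal transliteration of A: one pass over enumerate(lines, 1) appending to result_lines
def construct_input_with_markers_py (code : String) (cursor_line : Int) (cursor_col : Int) (start_line : Int) (end_line : Int) : String :=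
  let lines := PySem.Chars.splitOn code.toList ['\n']
  let result_lines : List (List Char) :=
    (PySem.List.enumerate lines 1).foldl (fun result_lines il =>
      let result_lines := if il.1 = start_line then result_lines ++ [pvStartMarker] else result_lines
      let result_lines := if il.1 = cursor_line then
          result_lines ++ [PySem.Chars.slice il.2 none (some cursor_col) ++ pvCursorMarker ++ PySem.Chars.slice il.2 (some cursor_col) none]
        else result_lines ++ [il.2]
      if il.1 = end_line then result_lines ++ [pvEndMarker] else result_lines) []
  String.ofList (PySem.Chars.join ['\n'] result_lines)

-- ===== PORT B =====
-- transliteration of Source B: in-place cursor edit by index, then two positional inserts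
def construct_input_with_markers_py_alt (code : String) (cursor_line : Int) (cursor_col : Int) (start_line : Int) (end_line : Int) : String :=
  let lines := PySem.Chars.splitOn code.toList ['\n']
  let n : Int := lines.length
  -- 'lines[cursor_line-1] = …': the guard puts the index in range, so getD/set are exact here
  let lines := if 1 ≤ cursor_line ∧ cursor_line ≤ n then
      let line := lines.getD (cursor_line - 1).toNat []
      lines.set (cursor_line - 1).toNat
        (PySem.Chars.slice line none (some cursor_col) ++ pvCursorMarker ++ PySem.Chars.slice line (some cursor_col) none)
    else lines
  let lines := if 1 ≤ end_line ∧ end_line ≤ n then PySem.List.insert lines end_line pvEndMarker else lines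
  let lines := if 1 ≤ start_line ∧ start_line ≤ n then
      let pos := start_line - 1
      let pos := if (1 ≤ end_line ∧ end_line ≤ n) ∧ end_line ≤ pos then pos + 1 else pos
      PySem.List.insert lines pos pvStartMarker
    else lines
  String.ofList (PySem.Chars.join ['\n'] lines)

-- ===== PRECONDITION & SPEC =====
def Spec_construct_input_with_markers_py (code : String) (cursor_line : Int) (cursor_col : Int) (start_line : Int) (end_line : Int) (out : String) : Prop := out = construct_input_with_markers_py_alt code cursor_line cursor_col start_line end_line
instance (code : String) (cursor_line : Int) (cursor_col : Int) (start_line : Int) (end_line : Int) (out : String) : Decidable (Spec_construct_input_with_markers_py code cursor_line cursor_col start_line end_line out) := by unfold Spec_construct_input_with_markers_py; infer_instance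

-- ===== CLAIM (what is proved, stated in full; the proofs are below) =====
def Claim_equal_construct_input_with_markers_py : Prop := ∀ (code : String) (cursor_line : Int) (cursor_col : Int) (start_line : Int) (end_line : Int), Dom_construct_input_with_markers_py code cursor_line cursor_col start_line end_line → Spec_construct_input_with_markers_py code cursor_line cursor_col start_line end_line (construct_input_with_markers_py code cursor_line cursor_col start_line end_line)

-- ===== LEMMAS AND PROOFS =====

-- apply the cursor rewrite at (1-based) position c
def pvM (c col : Int) : List (List Char) → List (List Char)
  | [] => []
  | y :: ys => (if c = 1 then
      PySem.Chars.slice y none (some col) ++ pvCursorMarker ++ PySem.Chars.slice y (some col) none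
    else y) :: pvM (c - 1) col ys

-- end marker after line e
def pvH1 (e : Int) : List (List Char) → List (List Char)
  | [] => []
  | y :: ys => y :: (if e = 1 then [pvEndMarker] else []) ++ pvH1 (e - 1) ys

-- start marker before line s, end marker after line e
def pvH2 (s e : Int) : List (List Char) → List (List Char)
  | [] => []
  | y :: ys => (if s = 1 then [pvStartMarker] else []) ++ y :: (if e = 1 then [pvEndMarker] else []) ++ pvH2 (s - 1) (e - 1) ys

-- insertion at a nat index, the shape PySem.List.insert_natCast produces
def pvIns (n : Nat) (a : List Char) (l : List (List Char)) : List (List Char) :=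
  l.take n ++ a :: l.drop n

lemma pvA_fold (s e c col : Int) (ls : List (List Char)) : ∀ (i : Int) (acc : List (List Char)),
    (PySem.List.enumerate ls i).foldl (fun result_lines il =>
      let result_lines := if il.1 = s then result_lines ++ [pvStartMarker] else result_lines
      let result_lines := if il.1 = c then
          result_lines ++ [PySem.Chars.slice il.2 none (some col) ++ pvCursorMarker ++ PySem.Chars.slice il.2 (some col) none]
        else result_lines ++ [il.2]
      if il.1 = e then result_lines ++ [pvEndMarker] else result_lines) acc
    = acc ++ pvH2 (s - i + 1) (e - i + 1) (pvM (c - i + 1) col ls) := by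
  induction ls with
  | nil => intro i acc; simp [PySem.List.enumerate_nil, pvM, pvH2]
  | cons y ys ih =>
    intro i acc
    rw [PySem.List.enumerate_cons, List.foldl_cons, ih]
    have h1 : (s - i + 1 = 1) = (i = s) := by apply propext; omega
    have h2 : (c - i + 1 = 1) = (i = c) := by apply propext; omega
    have h3 : (e - i + 1 = 1) = (i = e) := by apply propext; omega
    have h4 : s - i + 1 - 1 = s - (i + 1) + 1 := by omega
    have h5 : e - i + 1 - 1 = e - (i + 1) + 1 := by omega
    have h6 : c - i + 1 - 1 = c - (i + 1) + 1 := by omega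
    simp only [pvM, pvH2, h1, h2, h3, h4, h5, h6]
    split_ifs <;> simp

lemma pvM_length (c col : Int) (ls : List (List Char)) : (pvM c col ls).length = ls.length := by
  induction ls generalizing c with
  | nil => rfl
  | cons y ys ih => simp [pvM, ih]

lemma pvM_out (c col : Int) (ls : List (List Char)) (h : ¬(1 ≤ c ∧ c ≤ (ls.length : Int))) :
    pvM c col ls = ls := by
  induction ls generalizing c with
  | nil => rfl
  | cons y ys ih =>
    simp only [List.length_cons] at h
    rw [pvM, if_neg (by push_cast at h ⊢; omega),
        ih (c - 1) (by push_cast at h ⊢; omega)]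

lemma pvM_set (c col : Int) (ls : List (List Char)) (h : 1 ≤ c ∧ c ≤ (ls.length : Int)) :
    pvM c col ls = ls.set (c - 1).toNat
      (PySem.Chars.slice (ls.getD (c - 1).toNat []) none (some col) ++ pvCursorMarker ++
        PySem.Chars.slice (ls.getD (c - 1).toNat []) (some col) none) := by
  induction ls generalizing c with
  | nil => simp at h; omega
  | cons y ys ih =>
    by_cases hc : c = 1
    · subst hc
      rw [pvM, if_pos rfl, pvM_out (1-1) col ys (by omega)]
      simp
    · have h2 : 1 ≤ c - 1 ∧ c - 1 ≤ (ys.length : Int) := by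
        simp only [List.length_cons] at h; push_cast at h ⊢; omega
      have ht : (c - 1).toNat = (c - 1 - 1).toNat + 1 := by omega
      rw [pvM, if_neg hc, ih (c - 1) h2, ht]
      simp

lemma pvH1_out (e : Int) (ls : List (List Char)) (h : ¬(1 ≤ e ∧ e ≤ (ls.length : Int))) :
    pvH1 e ls = ls := by
  induction ls generalizing e with
  | nil => rfl
  | cons y ys ih =>
    simp only [List.length_cons] at h
    rw [pvH1, if_neg (by push_cast at h ⊢; omega),
        ih (e - 1) (by push_cast at h ⊢; omega)]
    simp

lemma pvH1_length (e : Int) (ls : List (List Char)) :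
    (pvH1 e ls).length = ls.length + (if 1 ≤ e ∧ e ≤ (ls.length : Int) then 1 else 0) := by
  induction ls generalizing e with
  | nil => simp [pvH1]; omega
  | cons y ys ih =>
    have hcl : (((y :: ys).length : Nat) : Int) = ((ys.length : Nat) : Int) + 1 := by
      simp only [List.length_cons]; push_cast; ring
    rw [pvH1]
    by_cases he : e = 1
    · subst he
      rw [pvH1_out (1-1) ys (by omega), if_pos rfl,
          if_pos (show 1 ≤ (1:Int) ∧ (1:Int) ≤ ((y :: ys).length : Int) from by omega)]
      simp only [List.length_cons, List.singleton_append, List.cons_append, List.nil_append,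
        List.length_append, List.length_nil]
    · rw [if_neg he]
      simp only [List.nil_append, List.singleton_append, List.cons_append, List.length_append,
        List.length_cons, List.length_nil, ih (e - 1)]
      by_cases hin : 1 ≤ e - 1 ∧ e - 1 ≤ (ys.length : Int)
      · rw [if_pos hin, if_pos (show 1 ≤ e ∧ e ≤ (((ys.length + 1 : Nat)) : Int) from by push_cast; omega)]
      · rw [if_neg hin, if_neg (show ¬(1 ≤ e ∧ e ≤ (((ys.length + 1 : Nat)) : Int)) from by push_cast at hin ⊢; omega)]

lemma pvH1_in (e : Int) (ls : List (List Char)) (h : 1 ≤ e ∧ e ≤ (ls.length : Int)) :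
    pvH1 e ls = pvIns e.toNat pvEndMarker ls := by
  induction ls generalizing e with
  | nil => simp at h; omega
  | cons y ys ih =>
    by_cases he : e = 1
    · subst he
      rw [pvH1, if_pos rfl, pvH1_out (1-1) ys (by omega)]
      simp [pvIns]
    · have h2 : 1 ≤ e - 1 ∧ e - 1 ≤ (ys.length : Int) := by
        simp only [List.length_cons] at h; push_cast at h ⊢; omega
      have ht : e.toNat = (e - 1).toNat + 1 := by omega
      rw [pvH1, if_neg he, ih (e - 1) h2, ht]
      simp [pvIns]

lemma pvH2_out (s e : Int) (ls : List (List Char)) (h : ¬(1 ≤ s ∧ s ≤ (ls.length : Int))) :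
    pvH2 s e ls = pvH1 e ls := by
  induction ls generalizing s e with
  | nil => rfl
  | cons y ys ih =>
    simp only [List.length_cons] at h
    rw [pvH2, pvH1, if_neg (by push_cast at h ⊢; omega),
        ih (s - 1) (e - 1) (by push_cast at h ⊢; omega)]
    simp

lemma pvH2_in (s e : Int) (ls : List (List Char)) (h : 1 ≤ s ∧ s ≤ (ls.length : Int)) :
    pvH2 s e ls = pvIns (if (1 ≤ e ∧ e ≤ (ls.length : Int)) ∧ e ≤ s - 1 then s.toNat else (s - 1).toNat)
      pvStartMarker (pvH1 e ls) := by
  induction ls generalizing s e with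
  | nil => simp at h; omega
  | cons y ys ih =>
    have hcl : (((y :: ys).length : Nat) : Int) = ((ys.length : Nat) : Int) + 1 := by
      simp only [List.length_cons]; push_cast; ring
    by_cases hs : s = 1
    · subst hs
      rw [pvH2, if_pos rfl, pvH2_out (1 - 1) (e - 1) ys (by omega), pvH1,
          if_neg (show ¬((1 ≤ e ∧ e ≤ ((y :: ys).length : Int)) ∧ e ≤ 1 - 1) from by omega)]
      simp [pvIns]
    · have h2 : 1 ≤ s - 1 ∧ s - 1 ≤ (ys.length : Int) := by omega
      rw [pvH2, if_neg hs, pvH1, ih (s - 1) (e - 1) h2]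
      by_cases he : e = 1
      · subst he
        rw [if_neg (show ¬((1 ≤ (1:Int) - 1 ∧ (1:Int) - 1 ≤ (ys.length : Int)) ∧ (1:Int) - 1 ≤ s - 1 - 1) from by omega),
            if_pos (show (1 ≤ (1:Int) ∧ (1:Int) ≤ ((y :: ys).length : Int)) ∧ (1:Int) ≤ s - 1 from by omega),
            show s.toNat = (s - 1 - 1).toNat + 2 from by omega]
        simp only [pvIns, if_true, List.nil_append, List.take_succ_cons,
          List.drop_succ_cons, List.cons_append]
      · have hcond : ((1 ≤ e - 1 ∧ e - 1 ≤ (ys.length : Int)) ∧ e - 1 ≤ s - 1 - 1)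
            = ((1 ≤ e ∧ e ≤ ((y :: ys).length : Int)) ∧ e ≤ s - 1) := by
          apply propext; constructor <;> (intro hh; exact ⟨⟨by omega, by omega⟩, by omega⟩)
        simp only [hcond, if_neg he]
        by_cases hb : (1 ≤ e ∧ e ≤ ((y :: ys).length : Int)) ∧ e ≤ s - 1
        · rw [if_pos hb, if_pos hb, show s.toNat = (s - 1).toNat + 1 from by omega]
          simp only [pvIns, List.nil_append, List.take_succ_cons, List.drop_succ_cons,
            List.cons_append]
        · rw [if_neg hb, if_neg hb, show (s - 1).toNat = (s - 1 - 1).toNat + 1 from by omega]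
          simp only [pvIns, List.nil_append, List.take_succ_cons, List.drop_succ_cons,
            List.cons_append]

-- ===== VERDICT (by name: the statement is the Claim_ definition above) =====
theorem construct_input_with_markers_py_spec : Claim_equal_construct_input_with_markers_py := by
  intro code c col s e _
  unfold Spec_construct_input_with_markers_py construct_input_with_markers_py construct_input_with_markers_py_alt
  set ls := PySem.Chars.splitOn code.toList ['\n'] with hls
  simp only
  rw [pvA_fold s e c col ls 1 []]
  simp only [List.nil_append, sub_add_cancel]
  refine congr_arg String.ofList (congr_arg (PySem.Chars.join ['\n']) ?_)
  have hM : (if 1 ≤ c ∧ c ≤ (ls.length : Int) then ls.set (c - 1).toNat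
      (PySem.Chars.slice (ls.getD (c - 1).toNat []) none (some col) ++ pvCursorMarker ++
        PySem.Chars.slice (ls.getD (c - 1).toNat []) (some col) none) else ls) = pvM c col ls := by
    by_cases hcc : 1 ≤ c ∧ c ≤ (ls.length : Int)
    · rw [if_pos hcc, pvM_set c col ls hcc]
    · rw [if_neg hcc, pvM_out c col ls hcc]
  rw [hM]
  set m := pvM c col ls with hm
  have hmlen : ((m.length : Nat) : Int) = ((ls.length : Nat) : Int) := by
    rw [hm, pvM_length]
  by_cases hsin : 1 ≤ s ∧ s ≤ (ls.length : Int)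
  · rw [if_pos hsin, pvH2_in s e m ⟨hsin.1, by rw [hmlen]; exact hsin.2⟩]
    simp only [hmlen]
    by_cases hein : 1 ≤ e ∧ e ≤ (ls.length : Int)
    · rw [if_pos hein, pvH1_in e m ⟨hein.1, by rw [hmlen]; exact hein.2⟩]
      have hei : PySem.List.insert m e pvEndMarker = pvIns e.toNat pvEndMarker m := by
        conv_lhs => rw [show e = ((e.toNat : Nat) : Int) from by omega]
        rw [PySem.List.insert_natCast m e.toNat pvEndMarker (by omega)]
        rfl
      rw [hei]
      have hlen : (pvIns e.toNat pvEndMarker m).length = m.length + 1 := by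
        rw [← pvH1_in e m ⟨hein.1, by rw [hmlen]; exact hein.2⟩, pvH1_length,
            if_pos ⟨hein.1, by rw [hmlen]; exact hein.2⟩]
      by_cases hb : (1 ≤ e ∧ e ≤ (ls.length : Int)) ∧ e ≤ s - 1
      · rw [if_pos hb, if_pos hb]
        conv_rhs => rw [show s = ((s.toNat : Nat) : Int) from by omega]
        rw [PySem.List.insert_natCast _ s.toNat pvStartMarker (by omega)]
        rfl
      · rw [if_neg hb, if_neg hb]
        conv_rhs => rw [show s - 1 = (((s - 1).toNat : Nat) : Int) from by omega]
        rw [PySem.List.insert_natCast _ (s - 1).toNat pvStartMarker (by omega)]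
        rfl
    · rw [if_neg hein, pvH1_out e m (by omega),
          if_neg (fun hh => hein hh.1), if_neg (fun hh => hein hh.1)]
      conv_rhs => rw [show s - 1 = (((s - 1).toNat : Nat) : Int) from by omega]
      rw [PySem.List.insert_natCast m (s - 1).toNat pvStartMarker (by omega)]
      rfl
  · rw [if_neg hsin, pvH2_out s e m (by omega)]
    by_cases hein : 1 ≤ e ∧ e ≤ (ls.length : Int)
    · rw [if_pos hein, pvH1_in e m ⟨hein.1, by rw [hmlen]; exact hein.2⟩]
      conv_rhs => rw [show e = ((e.toNat : Nat) : Int) from by omega]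
      rw [PySem.List.insert_natCast m e.toNat pvEndMarker (by omega)]
      rfl
    · rw [if_neg hein, pvH1_out e m (by omega)]
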